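-- pv_equiv track=rewrite | github.com/patarcom/nova_minv2 | miner_utils.py | find_chemically_identical
-- ===== SOURCE A (Python) =====
-- def find_chemically_identical(key_list: list[str]) -> dict:
--     """
--     Check for identical molecules in a list of SMILES strings by converting to InChIKeys.
--     """
--     inchikey_to_indices = {}
--
--     for i, inchikey in enumerate(key_list):
--         if inchikey not in inchikey_to_indices:
--             inchikey_to_indices[inchikey] = [i]
--         else:
--             inchikey_to_indices[inchikey].append(i)
--
--     duplicates = {k: v for k, v in inchikey_to_indices.items() if len(v) > 1}
--
--     return duplicates
-- ===== SOURCE B (Python) =====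
-- def find_chemically_identical(key_list: list[str]) -> dict:
--     result = {}
--     for key in dict.fromkeys(key_list):
--         indices = [i for i, k in enumerate(key_list) if k == key]
--         if len(indices) > 1:
--             result[key] = indices
--     return result
-- ===== Notes on version B (the rewrite author's own statement) =====
-- stated objective: alternative
-- what changed: Replaces the mutating hash-dict single-pass grouping with a two-level scan: deduplicate the keys (first occurrences in order), then collect each distinct key's indices with an independent per-key comprehension, keeping only multi-index keys.
import Mathlib
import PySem

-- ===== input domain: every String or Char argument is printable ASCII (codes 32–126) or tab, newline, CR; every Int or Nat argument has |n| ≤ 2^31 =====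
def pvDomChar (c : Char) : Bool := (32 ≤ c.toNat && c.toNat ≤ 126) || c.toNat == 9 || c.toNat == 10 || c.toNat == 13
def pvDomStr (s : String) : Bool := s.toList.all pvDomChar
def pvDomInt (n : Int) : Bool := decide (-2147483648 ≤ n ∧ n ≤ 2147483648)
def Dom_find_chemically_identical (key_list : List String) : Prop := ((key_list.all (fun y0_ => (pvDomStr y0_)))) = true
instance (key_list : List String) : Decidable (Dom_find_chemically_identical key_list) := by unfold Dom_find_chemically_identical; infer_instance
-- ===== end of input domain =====

-- B replaces A's mutating hash-dict single pass with dedup-then-per-key scans (alternative decomposition, same results).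


-- ===== PORT A =====
def find_chemically_identical (key_list : List String) : List (String × List Int) :=
  let d := (PySem.List.enumerate key_list).foldl
    (fun (d : PySem.Dict String (List Int)) p =>
      if d.contains p.2 then d.insert p.2 (d.getD p.2 [] ++ [p.1])
      else d.insert p.2 [p.1])
    PySem.Dict.empty
  (d.items).filter (fun kv => decide (1 < kv.2.length))

-- ===== PORT B =====
def find_chemically_identical_alt (key_list : List String) : List (String × List Int) :=
  (PySem.List.dedup key_list).filterMap (fun key =>
    let indices := (PySem.List.enumerate key_list).filterMap
      (fun p => if p.2 == key then some p.1 else none)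
    if 1 < indices.length then some (key, indices) else none)

-- ===== PRECONDITION & SPEC =====
def Spec_find_chemically_identical (key_list : List String) (out : List (String × List Int)) : Prop := out = find_chemically_identical_alt key_list
instance (key_list : List String) (out : List (String × List Int)) : Decidable (Spec_find_chemically_identical key_list out) := by unfold Spec_find_chemically_identical; infer_instance

-- ===== CLAIM (what is proved, stated in full; the proofs are below) =====
def Claim_equal_find_chemically_identical : Prop := ∀ (key_list : List String), Dom_find_chemically_identical key_list → Spec_find_chemically_identical key_list (find_chemically_identical key_list)

-- ===== LEMMAS AND PROOFS =====

-- A's loop step equals a Dict.modify-append step.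
theorem pv_step_eq (d : PySem.Dict String (List Int)) (p : Int × String) :
    (if d.contains p.2 then d.insert p.2 (d.getD p.2 [] ++ [p.1]) else d.insert p.2 [p.1])
      = d.modify p.2 [] (· ++ [p.1]) := by
  by_cases h : d.contains p.2 = true
  · simp [h, PySem.Dict.modify, PySem.Dict.getD_eq_get?_getD]
  · simp at h
    rw [PySem.Dict.modify, PySem.Dict.getD_of_not_contains (h := h)]
    simp [h]

theorem pv_filter_map_eq {α β : Type} (f : α → β) (p : β → Bool) (l : List α) :
    (l.map f).filter p = l.filterMap (fun x => if p (f x) then some (f x) else none) := by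
  induction l with
  | nil => rfl
  | cons x xs ih =>
    simp only [List.map_cons, List.filter_cons, List.filterMap_cons]
    by_cases h : p (f x) = true <;> simp [h, ih]

theorem pv_filterMap_if {α β : Type} (p : α → Bool) (f : α → β) (l : List α) :
    l.filterMap (fun x => if p x then some (f x) else none) = (l.filter p).map f := by
  induction l with
  | nil => rfl
  | cons x xs ih =>
    simp only [List.filterMap_cons, List.filter_cons]
    by_cases h : p x = true <;> simp [h, ih]

-- ===== VERDICT (by name: the statement is the Claim_ definition above) =====
theorem find_chemically_identical_spec : Claim_equal_find_chemically_identical := by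
  intro key_list _
  unfold Spec_find_chemically_identical find_chemically_identical find_chemically_identical_alt
  dsimp only
  -- rewrite A's fold into the modify-append fold over swapped enumerate pairs
  have hstep : ((PySem.List.enumerate key_list).foldl
      (fun (d : PySem.Dict String (List Int)) p =>
        if d.contains p.2 then d.insert p.2 (d.getD p.2 [] ++ [p.1])
        else d.insert p.2 [p.1]) PySem.Dict.empty)
      = (((PySem.List.enumerate key_list).map (fun p => (p.2, p.1))).foldl
          (fun (d : PySem.Dict String (List Int)) p => d.modify p.1 [] (· ++ [p.2]))
          PySem.Dict.empty) := by
    rw [List.foldl_map]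
    apply PySem.List.foldl_congr_mem
    intro acc x _
    exact pv_step_eq acc x
  rw [hstep]
  set l := ((PySem.List.enumerate key_list).map (fun p => (p.2, p.1))) with hl
  set d := l.foldl (fun (d : PySem.Dict String (List Int)) p => d.modify p.1 [] (· ++ [p.2]))
      PySem.Dict.empty with hd
  have hnodup : d.keys.Nodup := by
    rw [hd]
    exact PySem.Dict.nodup_keys_foldl_modify_key l (·.1) [] (fun _ p => (· ++ [p.2])) _
      PySem.Dict.nodup_keys_empty
  have hkeys : d.keys = PySem.List.dedup key_list := by
    rw [hd, PySem.Dict.keys_foldl_modify_key]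
    simp [hl, List.map_map, Function.comp_def, PySem.List.map_snd_enumerate,
      PySem.Dict.keys_empty, PySem.Set.update, PySem.Set.ofList_eq_foldl]
  have hgetD : ∀ k, d.getD k [] =
      (PySem.List.enumerate key_list).filterMap
        (fun p => if p.2 == k then some p.1 else none) := by
    intro k
    rw [hd, PySem.Dict.getD_foldl_modify_append, pv_filterMap_if]
    simp [hl, List.filter_map, List.map_map, Function.comp_def, PySem.Dict.getD_empty]
  have hitems : d.items = (PySem.List.dedup key_list).map (fun k => (k, d.getD k [])) := by
    rw [PySem.Dict.items_eq_map_keys d hnodup [], hkeys]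
  rw [hitems, pv_filter_map_eq]
  refine List.filterMap_congr ?_
  intro k _
  rw [hgetD k]
  simp
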